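-- pv_equiv track=rewrite | github.com/xunoaib/safecracker-solutions | tile_elimination/solve.py | solve
-- ===== SOURCE A (Python) =====
-- def neighbors(tiles, r, c):
--     for d in (1, 2):
--         for roff, coff in [
--             (-d, 0),
--             (d, 0),
--             (0, d),
--             (0, -d),
--             (d, d),
--             (d, -d),
--             (-d, d),
--             (-d, -d),
--         ]:
--             n = (r + roff, c + coff)
--             if n in tiles:
--                 yield n
--
-- def solve(tiles, start):
--     q = [(start, tiles, (start, ))]
--     while q:
--         p, tiles, path = q.pop()
--         if not tiles:
--             return path
--         for n in neighbors(tiles, *p):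
--             q.append((n, tiles - {n}, path + (n, )))
-- ===== SOURCE B (Python) =====
-- def neighbors(tiles, r, c):
--     for d in (1, 2):
--         for roff, coff in [
--             (-d, 0),
--             (d, 0),
--             (0, d),
--             (0, -d),
--             (d, d),
--             (d, -d),
--             (-d, d),
--             (-d, -d),
--         ]:
--             n = (r + roff, c + coff)
--             if n in tiles:
--                 yield n
--
-- def solve(tiles, start):
--     def dfs(p, tiles, path):
--         if not tiles:
--             return path
--         for n in reversed(list(neighbors(tiles, *p))):
--             res = dfs(n, tiles - {n}, path + (n,))
--             if res is not None:
--                 return res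
--         return None
--     return dfs(start, tiles, (start,))
-- ===== Notes on version B (the rewrite author's own statement) =====
-- stated objective: alternative
-- what changed: Replaced A's explicit worklist stack (pop last, push all successor states eagerly) by a recursive first-success DFS that iterates reversed neighbor lists and recurses, so only one branch's state is materialised at a time.
import Mathlib
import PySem

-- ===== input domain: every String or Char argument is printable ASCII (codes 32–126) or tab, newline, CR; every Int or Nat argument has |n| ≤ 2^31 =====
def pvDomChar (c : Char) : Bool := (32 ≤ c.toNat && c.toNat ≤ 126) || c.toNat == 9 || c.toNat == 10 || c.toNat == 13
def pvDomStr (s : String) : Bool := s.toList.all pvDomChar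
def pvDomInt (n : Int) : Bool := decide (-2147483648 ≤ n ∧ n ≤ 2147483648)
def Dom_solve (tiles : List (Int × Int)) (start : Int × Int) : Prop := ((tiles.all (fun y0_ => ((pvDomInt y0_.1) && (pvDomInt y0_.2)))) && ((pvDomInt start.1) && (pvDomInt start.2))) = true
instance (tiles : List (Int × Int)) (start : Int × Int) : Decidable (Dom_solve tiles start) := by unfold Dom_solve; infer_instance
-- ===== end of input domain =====

-- B replaces A's explicit-stack worklist loop by a recursive DFS over reversed neighbour
-- lists (first-success recursion); same return value, different decomposition ('alternative').

-- ===== PORT A =====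
-- neighbors(tiles, r, c): for d in (1,2): for each offset: yield (r+roff, c+coff) if in tiles
def neighbors (tiles : List (Int × Int)) (r : Int) (c : Int) : List (Int × Int) :=
  (([(1 : Int), 2].flatMap (fun d =>
      [(-d, (0 : Int)), (d, 0), (0, d), (0, -d), (d, d), (d, -d), (-d, d), (-d, -d)].map
        (fun off => (r + off.1, c + off.2))))).filter
    (fun n => PySem.Set.contains tiles n)

-- facts the ports' termination proofs cite
theorem pvNeighbors_length_le (tiles : List (Int × Int)) (r c : Int) :
    (neighbors tiles r c).length ≤ 16 := by
  unfold neighbors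
  exact le_trans (List.length_filter_le _ _) (by simp)

theorem pvMem_neighbors {tiles : List (Int × Int)} {r c : Int} {n : Int × Int}
    (h : n ∈ neighbors tiles r c) : n ∈ tiles := by
  unfold neighbors at h
  simp [List.mem_filter] at h
  exact h.2

theorem pvDiff_length_lt {tiles : List (Int × Int)} {n : Int × Int} (h : n ∈ tiles) :
    (PySem.Set.diff tiles [n]).length < tiles.length := by
  simp only [PySem.Set.diff]
  refine List.length_filter_lt_length_iff_exists.mpr ⟨n, h, by simp⟩

-- termination weight: a state whose tile set has k elements pushes at most 16 children of
-- smaller tile sets, so weigh it pvW k with pvW (k+1) = 1 + 16 * pvW k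
def pvW : Nat → Nat
  | 0 => 1
  | k + 1 => 1 + 16 * pvW k

theorem pvW_mono {a b : Nat} (h : a ≤ b) : pvW a ≤ pvW b := by
  induction h with
  | refl => exact le_refl _
  | @step m _ ih =>
      refine le_trans ih ?_
      show pvW m ≤ pvW (m + 1)
      simp only [pvW]
      omega

def pvMu (q : List ((Int × Int) × List (Int × Int) × List (Int × Int))) : Nat :=
  (q.map (fun s => pvW s.2.1.length)).sum

-- solve(tiles, start): explicit stack q, pop last, return path when tiles empty,
-- else push (n, tiles - {n}, path + (n,)) for each neighbour.
-- The stack is held TOP-FIRST (head = Python's q[-1]); q.pop() is taking the head and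
-- the appended children arrive reversed at the front.
def solveLoop (q : List ((Int × Int) × List (Int × Int) × List (Int × Int))) :
    Option (List (Int × Int)) :=
  match q with
  | [] => none
  | (p, tiles, path) :: rest =>
      if tiles.isEmpty then some path
      else
        solveLoop
          ((((neighbors tiles p.1 p.2).map
              (fun n => (n, PySem.Set.diff tiles [n], path ++ [n]))).reverse) ++ rest)
termination_by pvMu q
decreasing_by
  rename_i hne
  simp only [pvMu, List.map_append, List.sum_append, List.map_reverse, List.sum_reverse,
    List.map_cons, List.sum_cons, List.map_map]
  have hlen : ∃ m, tiles.length = m + 1 := by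
    cases tiles with
    | nil => simp at hne
    | cons a t => exact ⟨t.length, rfl⟩
  obtain ⟨m, hm⟩ := hlen
  have hW : pvW tiles.length = 1 + 16 * pvW m := by rw [hm]; simp [pvW]
  refine Nat.add_lt_add_right ?_ _
  refine lt_of_le_of_lt (List.sum_le_card_nsmul _ (pvW m) ?_) ?_
  · intro x hx
    simp only [List.mem_map, Function.comp] at hx
    obtain ⟨n, hn, rfl⟩ := hx
    show pvW (PySem.Set.diff tiles [n]).length ≤ pvW m
    have h1 : (PySem.Set.diff tiles [n]).length < tiles.length :=
      pvDiff_length_lt (pvMem_neighbors hn)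
    exact pvW_mono (by omega)
  · simp only [List.length_map, smul_eq_mul]
    have h16 := pvNeighbors_length_le tiles p.1 p.2
    have hmul := Nat.mul_le_mul_right (pvW m) h16
    rw [hW]
    omega

def solve (tiles : List (Int × Int)) (start : Int × Int) : Option (List (Int × Int)) :=
  solveLoop [(start, tiles, [start])]

-- ===== PORT B =====
-- dfs(p, tiles, path): if not tiles: return path; for n in reversed(list(neighbors(tiles,*p))):
--   first non-None of dfs(n, tiles - {n}, path + (n,)); else None.
-- (the for-loop-with-early-return is List.findSome?; attach carries the membership
--  proof needed for termination)
def dfsB (p : Int × Int) (tiles : List (Int × Int)) (path : List (Int × Int)) :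
    Option (List (Int × Int)) :=
  if tiles.isEmpty then some path
  else
    ((neighbors tiles p.1 p.2).reverse).attach.findSome?
      (fun n => dfsB n.1 (PySem.Set.diff tiles [n.1]) (path ++ [n.1]))
termination_by tiles.length
decreasing_by
  exact pvDiff_length_lt (pvMem_neighbors (List.mem_reverse.mp n.2))

def solve_alt (tiles : List (Int × Int)) (start : Int × Int) : Option (List (Int × Int)) :=
  dfsB start tiles [start]

-- ===== PRECONDITION & SPEC =====
def Spec_solve (tiles : List (Int × Int)) (start : Int × Int) (out : Option (List (Int × Int))) : Prop := out = solve_alt tiles start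
instance (tiles : List (Int × Int)) (start : Int × Int) (out : Option (List (Int × Int))) : Decidable (Spec_solve tiles start out) := by unfold Spec_solve; infer_instance

-- ===== CLAIM (what is proved, stated in full; the proofs are below) =====
def Claim_equal_solve : Prop := ∀ (tiles : List (Int × Int)) (start : Int × Int), Dom_solve tiles start → Spec_solve tiles start (solve tiles start)

-- ===== LEMMAS AND PROOFS =====

theorem pvFindSome?_attach {α β : Type} (l : List α) (g : α → Option β) :
    l.attach.findSome? (fun x => g x.1) = l.findSome? g := by
  conv_rhs => rw [← List.attach_map_subtype_val l]
  rw [List.findSome?_map]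
  rfl

-- the stack loop computes the first success of dfsB over the stack, top first
theorem pvLoop_eq (q : List ((Int × Int) × List (Int × Int) × List (Int × Int))) :
    solveLoop q = q.findSome? (fun s => dfsB s.1 s.2.1 s.2.2) := by
  induction q using solveLoop.induct with
  | case1 => simp [solveLoop]
  | case2 p tiles path rest h =>
      rw [solveLoop]
      simp only [h, if_true]
      rw [List.findSome?_cons]
      rw [dfsB]
      simp [h]
  | case3 p tiles path rest h ih =>
      rw [solveLoop]
      simp only [h]
      rw [ih, List.findSome?_append]
      have hhead :
          ((((neighbors tiles p.1 p.2).map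
              (fun n => (n, PySem.Set.diff tiles [n], path ++ [n]))).reverse).findSome?
            (fun s => dfsB s.1 s.2.1 s.2.2)) = dfsB p tiles path := by
        rw [← List.map_reverse, List.findSome?_map]
        rw [dfsB]
        simp only [h, if_false, Bool.false_eq_true]
        exact (pvFindSome?_attach ((neighbors tiles p.1 p.2).reverse)
          (fun n => dfsB n (PySem.Set.diff tiles [n]) (path ++ [n]))).symm
      rw [hhead, List.findSome?_cons]
      cases hd : dfsB p tiles path <;> simp [Option.or]

-- ===== VERDICT (by name: the statement is the Claim_ definition above) =====
theorem solve_spec : Claim_equal_solve := by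
  intro tiles start _
  unfold Spec_solve solve solve_alt
  rw [pvLoop_eq]
  cases h : dfsB start tiles [start] <;> simp [h]
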